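-- pv_equiv track=rewrite | github.com/mgtezak/Advent_of_Code | 2020/03/p2.py | part2
-- ===== SOURCE A (Python) =====
-- def part2(puzzle_input):
--
--     def count_trees(right=3, down=1):
--         tree_count = 0
--         j = 0
--         l = len(slope[0])
--         for i, row in enumerate(slope):
--             if down == 2 and i%2:
--                 continue
--             if row[j] == '#':
--                 tree_count += 1
--             j = (j + right) % l
--         return tree_count
--
--     slope = puzzle_input.split('\n')
--     instructions = [(1, 1), (3, 1), (5, 1), (7, 1), (1, 2)]
--     mul = 1
--     for right, down in instructions:
--         mul *= count_trees(right, down)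
--     return mul
-- ===== SOURCE B (Python) =====
-- def part2(puzzle_input):
--     rows = puzzle_input.split('\n')
--     l = len(rows[0])
--     states = [(r, d, 0, 0) for r, d in [(1, 1), (3, 1), (5, 1), (7, 1), (1, 2)]]
--     for i, row in enumerate(rows):
--         trees = {k for k, ch in enumerate(row) if ch == '#'}
--         states = [(r, d, (c + r) % l, cnt + (c in trees)) if i % d == 0
--                   else (r, d, c, cnt)
--                   for r, d, c, cnt in states]
--     mul = 1
--     for _, _, _, cnt in states:
--         mul *= cnt
--     return mul
-- ===== Notes on version B (the rewrite author's own statement) =====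
-- stated objective: alternative
-- what changed: B interchanges the loops: instead of A's five separate passes over the grid (one per slope, comparing a character with a running column), B makes a single pass over the rows, building for each row the set of tree columns once and simultaneously advancing a vector of five (right, down, column, count) slope states, testing set membership; the product is taken at the end.
import Mathlib
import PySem

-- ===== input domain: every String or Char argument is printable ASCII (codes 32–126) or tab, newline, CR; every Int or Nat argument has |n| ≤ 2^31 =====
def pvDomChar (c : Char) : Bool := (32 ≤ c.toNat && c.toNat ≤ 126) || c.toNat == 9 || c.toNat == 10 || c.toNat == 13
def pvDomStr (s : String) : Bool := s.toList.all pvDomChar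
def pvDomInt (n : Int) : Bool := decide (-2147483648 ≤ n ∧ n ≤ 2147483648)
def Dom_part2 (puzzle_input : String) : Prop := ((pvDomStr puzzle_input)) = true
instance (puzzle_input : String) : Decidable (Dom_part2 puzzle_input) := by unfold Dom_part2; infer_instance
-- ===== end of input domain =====

-- B interchanges the loops: one pass over the rows advancing all five slope states at
-- once, with a per-row set of tree columns tested by membership (objective: alternative).

-- ===== PORT A =====
-- helper = Python's nested `count_trees`: fold over enumerate(slope) with state (tree_count, j)
def part2.countTrees (slope : List String) (right down : Int) : Int :=
  let l : Int := ((slope.headD "").toList.length : Int)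
  (slope.zipIdx.foldl
    (fun (st : Int × Int) (ri : String × Nat) =>
      if down = 2 ∧ ri.2 % 2 ≠ 0 then st
      else ((if PySem.Str.pyGet? ri.1 st.2 = some '#' then st.1 + 1 else st.1),
            PySem.Int.mod (st.2 + right) l))
    ((0 : Int), (0 : Int))).1

def part2 (puzzle_input : String) : Int :=
  let slope := (PySem.Str.split? puzzle_input "\n").getD []
  let instructions : List (Int × Int) := [(1, 1), (3, 1), (5, 1), (7, 1), (1, 2)]
  instructions.foldl (fun mul rd => mul * part2.countTrees slope rd.1 rd.2) 1

-- ===== PORT B =====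
-- single pass over enumerate(rows); state = list of (right, down, column, count);
-- per row the set {k for k,ch in enumerate(row) if ch=='#'} is built once and the
-- five states are advanced by a list comprehension testing membership
def part2_alt (puzzle_input : String) : Int :=
  let rows := (PySem.Str.split? puzzle_input "\n").getD []
  let l : Int := ((rows.headD "").toList.length : Int)
  let states : List (Int × Int × Int × Int) :=
    ([(1, 1), (3, 1), (5, 1), (7, 1), (1, 2)] : List (Int × Int)).map
      (fun rd => (rd.1, rd.2, (0 : Int), (0 : Int)))
  let final := rows.zipIdx.foldl
    (fun (sts : List (Int × Int × Int × Int)) (ri : String × Nat) =>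
      sts.map (fun st =>
        if PySem.Int.mod (ri.2 : Int) st.2.1 = 0 then
          (st.1, st.2.1, PySem.Int.mod (st.2.2.1 + st.1) l,
           st.2.2.2 +
             (if st.2.2.1 ∈ PySem.Set.ofList
                 ((PySem.List.enumerate ri.1.toList 0).filterMap
                   (fun kc => if kc.2 = '#' then some kc.1 else none))
              then (1 : Int) else 0))
        else st))
    states
  final.foldl (fun mul st => mul * st.2.2.2) 1

-- ===== PRECONDITION & SPEC =====
-- Pre_part2 holds exactly when, for every slope (right, down) and every visited row i,
-- the visited column (i/down*right) mod len(row 0) is inside row i — precisely the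
-- inputs on which Python A returns (otherwise row[j] raises IndexError, including the
-- case of an empty first row).
def Pre_part2 (puzzle_input : String) : Prop :=
  (let rows := (PySem.Str.split? puzzle_input "\n").getD []
   let l := (rows.headD "").toList.length
   ([(1, 1), (3, 1), (5, 1), (7, 1), (1, 2)] : List (Nat × Nat)).all (fun rd =>
     (List.range rows.length).all (fun i =>
       !(rd.2 == 1 || i % 2 == 0) ||
         decide ((i / rd.2 * rd.1) % l < (rows.getD i "").toList.length)))) = true
instance (puzzle_input : String) : Decidable (Pre_part2 puzzle_input) := by
  unfold Pre_part2; infer_instance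

def pvWitness_part2 : String := "..#\n#..\n.#."

def Spec_part2 (puzzle_input : String) (out : Int) : Prop := out = part2_alt puzzle_input
instance (puzzle_input : String) (out : Int) : Decidable (Spec_part2 puzzle_input out) := by
  unfold Spec_part2; infer_instance

-- ===== CLAIM (what is proved, stated in full; the proofs are below) =====
def Claim_equal_part2 : Prop := ∀ (puzzle_input : String), Dom_part2 puzzle_input → Pre_part2 puzzle_input → Spec_part2 puzzle_input (part2 puzzle_input)

-- ===== LEMMAS AND PROOFS =====

-- a fold that maps the same per-element update over a list of states is the list of
-- the per-state folds (the five slope states evolve independently)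
lemma pv_map_fold {α σ : Type} (g : α → σ → σ) :
    ∀ (xs : List α) (sts : List σ),
    xs.foldl (fun s x => s.map (g x)) sts = sts.map (fun s => xs.foldl (fun s x => g x s) s) := by
  intro xs
  induction xs with
  | nil => intro sts; simp
  | cons a rest ih =>
    intro sts
    simp only [List.foldl_cons, ih, List.map_map]
    rfl

-- PySem.Int.mod by zero is the identity (Python would raise there; the port is total)
lemma pv_mod_zero (x : Int) : PySem.Int.mod x 0 = x := by
  simp [PySem.Int.mod]

-- membership of a nonnegative column in the row's tree-column set is exactly
-- "the character at that column is '#'"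
lemma pv_mem_trees (row : String) (c : Int) (hc : 0 ≤ c) :
    (c ∈ PySem.Set.ofList
        ((PySem.List.enumerate row.toList 0).filterMap
          (fun kc => if kc.2 = '#' then some kc.1 else none)))
    ↔ PySem.Str.pyGet? row c = some '#' := by
  obtain ⟨n, rfl⟩ := Int.eq_ofNat_of_zero_le hc
  rw [PySem.Set.mem_ofList, List.mem_filterMap]
  constructor
  · rintro ⟨kc, hmem, hf⟩
    rw [PySem.List.mem_enumerate_iff] at hmem
    obtain ⟨k, hk, rfl⟩ := hmem
    by_cases hch : row.toList[k] = '#'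
    · rw [if_pos hch] at hf
      have hkn : (k : Int) = (n : Int) := by simpa using hf
      have : k = n := by exact_mod_cast hkn
      subst this
      simp [PySem.Str.pyGet?, PySem.Chars.pyGet?, PySem.List.pyGet?_natCast,
        List.getElem?_eq_getElem hk, hch]
    · rw [if_neg hch] at hf; exact absurd hf (by simp)
  · intro h
    have h' : row.toList[n]? = some '#' := by
      simpa [PySem.Str.pyGet?, PySem.Chars.pyGet?, PySem.List.pyGet?_natCast] using h
    rw [List.getElem?_eq_some_iff] at h'
    obtain ⟨hn, hch⟩ := h'
    refine ⟨((n : Int), row.toList[n]), ?_, ?_⟩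
    · rw [PySem.List.mem_enumerate_iff]
      exact ⟨n, hn, by simp⟩
    · rw [if_pos hch]

-- one slope state of B, folded over the rows, carries exactly A's (tree_count, j) pair
lemma pv_state (l r d : Int) (hl : 0 ≤ l) (hr : 0 ≤ r) (hd : d = 1 ∨ d = 2) :
    ∀ (rows : List String) (k : Nat) (c cnt : Int), 0 ≤ c →
    (rows.zipIdx k).foldl
      (fun (st : Int × Int × Int × Int) (ri : String × Nat) =>
        if PySem.Int.mod (ri.2 : Int) st.2.1 = 0 then
          (st.1, st.2.1, PySem.Int.mod (st.2.2.1 + st.1) l,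
           st.2.2.2 +
             (if st.2.2.1 ∈ PySem.Set.ofList
                 ((PySem.List.enumerate ri.1.toList 0).filterMap
                   (fun kc => if kc.2 = '#' then some kc.1 else none))
              then (1 : Int) else 0))
        else st)
      (r, d, c, cnt)
    = (r, d,
       ((rows.zipIdx k).foldl
         (fun (st : Int × Int) (ri : String × Nat) =>
           if d = 2 ∧ ri.2 % 2 ≠ 0 then st
           else ((if PySem.Str.pyGet? ri.1 st.2 = some '#' then st.1 + 1 else st.1),
                 PySem.Int.mod (st.2 + r) l))
         (cnt, c)).2,
       ((rows.zipIdx k).foldl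
         (fun (st : Int × Int) (ri : String × Nat) =>
           if d = 2 ∧ ri.2 % 2 ≠ 0 then st
           else ((if PySem.Str.pyGet? ri.1 st.2 = some '#' then st.1 + 1 else st.1),
                 PySem.Int.mod (st.2 + r) l))
         (cnt, c)).1) := by
  intro rows
  induction rows with
  | nil => intro k c cnt hc; simp
  | cons a rest ih =>
    intro k c cnt hc
    simp only [List.zipIdx_cons, List.foldl_cons]
    have hcond : (PySem.Int.mod (k : Int) d = 0) ↔ ¬(d = 2 ∧ (k % 2 ≠ 0)) := by
      rcases hd with rfl | rfl
      · rw [PySem.Int.mod_eq_emod_of_pos (by norm_num)]; omega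
      · rw [PySem.Int.mod_eq_emod_of_pos (by norm_num)]; omega
    by_cases hC : d = 2 ∧ (k % 2 ≠ 0)
    · rw [if_neg (fun h => (hcond.mp h) hC), if_pos hC]
      exact ih (k + 1) c cnt hc
    · rw [if_pos (hcond.mpr hC), if_neg hC]
      have hmem := pv_mem_trees a c hc
      have hcnt : cnt + (if c ∈ PySem.Set.ofList
            ((PySem.List.enumerate a.toList 0).filterMap
              (fun kc => if kc.2 = '#' then some kc.1 else none))
          then (1 : Int) else 0)
          = (if PySem.Str.pyGet? a c = some '#' then cnt + 1 else cnt) := by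
        rw [if_congr hmem rfl rfl]; split_ifs <;> ring
      rw [hcnt]
      have hc' : 0 ≤ PySem.Int.mod (c + r) l := by
        rcases hl.lt_or_eq with h | h
        · exact PySem.Int.mod_nonneg _ h
        · rw [← h, pv_mod_zero]; omega
      exact ih (k + 1) (PySem.Int.mod (c + r) l)
        (if PySem.Str.pyGet? a c = some '#' then cnt + 1 else cnt) hc'

-- ===== VERDICT (by name: the statement is the Claim_ definition above) =====
theorem part2_spec : Claim_equal_part2 := by
  intro s _ _
  unfold Spec_part2
  simp only [part2, part2_alt, part2.countTrees]
  rw [pv_map_fold (fun (ri : String × Nat) (st : Int × Int × Int × Int) =>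
    if PySem.Int.mod (ri.2 : Int) st.2.1 = 0 then
      (st.1, st.2.1,
       PySem.Int.mod (st.2.2.1 + st.1)
         (((((PySem.Str.split? s "\n").getD []).headD "").toList.length : Int)),
       st.2.2.2 +
         (if st.2.2.1 ∈ PySem.Set.ofList
             ((PySem.List.enumerate ri.1.toList 0).filterMap
               (fun kc => if kc.2 = '#' then some kc.1 else none))
          then (1 : Int) else 0))
    else st)]
  simp only [List.map_cons, List.map_nil, List.foldl_cons, List.foldl_nil]
  rw [pv_state _ 1 1 (by positivity) (by norm_num) (Or.inl rfl) _ 0 0 0 le_rfl,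
      pv_state _ 3 1 (by positivity) (by norm_num) (Or.inl rfl) _ 0 0 0 le_rfl,
      pv_state _ 5 1 (by positivity) (by norm_num) (Or.inl rfl) _ 0 0 0 le_rfl,
      pv_state _ 7 1 (by positivity) (by norm_num) (Or.inl rfl) _ 0 0 0 le_rfl,
      pv_state _ 1 2 (by positivity) (by norm_num) (Or.inr rfl) _ 0 0 0 le_rfl]
  simp
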